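-- pv_equiv track=rewrite | github.com/dainonaka/checkio | ew_cities.py | subnetworks
-- ===== SOURCE A (Python) =====
-- def subnetworks(net, crushes):
--     crushes = set(crushes)
--     for num in range(len(net)):
--         net[num] = set(net[num])-crushes
--     cnt = 0
--     try:net.remove(set())
--     except: pass
--     for n in range(len(net)):
--         if not any([net[n] & net[m] for m in range(len(net)) if not n >= m]):
--             cnt += 1
--     return cnt
-- ===== SOURCE B (Python) =====
-- def subnetworks(net, crushes):
--     # Same result as A, computed in one pass over the elements:
--     # precompute each element's last containing-set index; a set is isolated
--     # iff every one of its elements last occurs in it.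
--     # (Unlike A, this does not mutate `net`; return value only.)
--     crushes = set(crushes)
--     sets = [set(s) - crushes for s in net]
--     try:
--         sets.remove(set())
--     except ValueError:
--         pass
--     last = {}
--     for i, s in enumerate(sets):
--         for e in s:
--             last[e] = i
--     cnt = 0
--     for i, s in enumerate(sets):
--         if all(last[e] == i for e in s):
--             cnt += 1
--     return cnt
-- ===== Notes on version B (the rewrite author's own statement) =====
-- stated objective: faster
-- what changed: A tests every pair of sets with an O(n^2) nested scan of pairwise intersections; B builds one dict mapping each element to the last index of a set containing it and then decides each set in a single pass, removing the inner scan entirely.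
import Mathlib
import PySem

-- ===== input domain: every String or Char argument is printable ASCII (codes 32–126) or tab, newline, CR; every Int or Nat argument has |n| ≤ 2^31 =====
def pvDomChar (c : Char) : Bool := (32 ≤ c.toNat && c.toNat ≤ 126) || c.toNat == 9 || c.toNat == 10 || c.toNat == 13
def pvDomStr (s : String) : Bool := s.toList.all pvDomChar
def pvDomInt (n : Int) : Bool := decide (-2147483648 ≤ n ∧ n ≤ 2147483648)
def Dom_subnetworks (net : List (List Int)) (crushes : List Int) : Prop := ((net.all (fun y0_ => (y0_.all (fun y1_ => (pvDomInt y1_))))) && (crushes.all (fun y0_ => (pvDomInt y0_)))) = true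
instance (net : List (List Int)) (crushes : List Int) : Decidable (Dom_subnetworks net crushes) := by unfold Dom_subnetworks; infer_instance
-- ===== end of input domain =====

-- B replaces A's O(n^2) pairwise-intersection scan by an element -> last-containing-set-index map (measured faster); A mutates `net` in place, B does not: the equivalence is about the RETURN value only.

-- ===== PORT A =====
-- faithful port of A (note: the Python A mutates `net` in place; the claim is about the return value only)
def subnetworks (net : List (List Int)) (crushes : List Int) : Int :=
  let crushSet : PySem.Set Int := PySem.Set.ofList crushes
  -- for num in range(len(net)): net[num] = set(net[num]) - crushes   (element-wise in-place update = map)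
  let net1 : List (PySem.Set Int) := net.map (fun row => PySem.Set.diff (PySem.Set.ofList row) crushSet)
  -- try: net.remove(set())  except: pass
  let net2 : List (PySem.Set Int) := (PySem.List.remove? net1 ([] : PySem.Set Int)).getD net1
  -- for n in range(len(net)): if not any([net[n] & net[m] for m in range(len(net)) if not n >= m]): cnt += 1
  (PySem.List.pyRange 0 net2.length 1).foldl (fun cnt n =>
    if (((PySem.List.pyRange 0 net2.length 1).filter (fun m => !(n ≥ m))).map
          (fun m => PySem.Set.inter (PySem.List.pyGetD net2 n []) (PySem.List.pyGetD net2 m []))).any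
        (fun s => !s.isEmpty)
    then cnt else cnt + 1) 0

-- ===== PORT B =====
-- faithful port of Source B: element -> last containing-set index, then one pass
def subnetworks_alt (net : List (List Int)) (crushes : List Int) : Int :=
  let crushSet : PySem.Set Int := PySem.Set.ofList crushes
  let sets : List (PySem.Set Int) := net.map (fun s => PySem.Set.diff (PySem.Set.ofList s) crushSet)
  let sets2 : List (PySem.Set Int) := (PySem.List.remove? sets ([] : PySem.Set Int)).getD sets
  let last : PySem.Dict Int Int := (PySem.List.enumerate sets2 0).foldl
    (fun d p => p.2.foldl (fun d e => d.insert e p.1) d) PySem.Dict.empty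
  -- last[e] in Source B never raises (every e was inserted); getD's default -1 is never an index
  (PySem.List.enumerate sets2 0).foldl (fun cnt p =>
    if p.2.all (fun e => last.getD e (-1) == p.1) then cnt + 1 else cnt) 0

-- ===== PRECONDITION & SPEC =====
def Spec_subnetworks (net : List (List Int)) (crushes : List Int) (out : Int) : Prop := out = subnetworks_alt net crushes
instance (net : List (List Int)) (crushes : List Int) (out : Int) : Decidable (Spec_subnetworks net crushes out) := by unfold Spec_subnetworks; infer_instance

-- ===== CLAIM (what is proved, stated in full; the proofs are below) =====
def Claim_equal_subnetworks : Prop := ∀ (net : List (List Int)) (crushes : List Int), Dom_subnetworks net crushes → Spec_subnetworks net crushes (subnetworks net crushes)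

-- ===== LEMMAS AND PROOFS =====

-- the dict Source B builds: element -> last index of a set containing it
def pvLast (L : List (List Int)) : PySem.Dict Int Int :=
  (PySem.List.enumerate L 0).foldl (fun d p => p.2.foldl (fun d e => d.insert e p.1) d) PySem.Dict.empty

lemma foldl_insert_const_getD (s : List Int) (i : Int) (d : PySem.Dict Int Int) (e dflt : Int) :
    (s.foldl (fun d x => d.insert x i) d).getD e dflt = if e ∈ s then i else d.getD e dflt := by
  induction s generalizing d with
  | nil => simp
  | cons x t ih =>
    simp only [List.foldl_cons, ih, PySem.Dict.getD_insert, List.mem_cons]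
    by_cases hx : e = x <;> by_cases ht : e ∈ t <;> simp [hx, ht]

lemma pvLast_append (L : List (List Int)) (s : List Int) :
    pvLast (L ++ [s]) = s.foldl (fun d e => d.insert e (L.length : Int)) (pvLast L) := by
  simp [pvLast, PySem.List.enumerate_append, PySem.List.enumerate_cons, List.foldl_append]

lemma pvLast_getD_spec (L : List (List Int)) :
    ∀ (i : Nat), i < L.length → ∀ e ∈ L.getD i [],
      ((pvLast L).getD e (-1) = (i : Int) ↔ ∀ m, i < m → m < L.length → e ∉ L.getD m []) := by
  induction L using List.reverseRecOn with
  | nil => intro i hi; simp at hi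
  | append_singleton L s ih =>
    intro i hi e he
    rw [pvLast_append, foldl_insert_const_getD]
    rcases Nat.lt_or_ge i L.length with h | h
    · rw [List.getD_append _ _ _ _ h] at he
      by_cases hs : e ∈ s
      · simp only [hs, if_pos]
        constructor
        · intro hEq
          have : L.length = i := by exact_mod_cast hEq
          omega
        · intro hall
          have hm : L.length < (L ++ [s]).length := by simp
          have hx := hall L.length h hm
          rw [List.getD_append_right _ _ _ _ (le_refl _)] at hx
          simp only [Nat.sub_self] at hx
          exact (hx (by simpa using hs)).elim
      · simp only [hs, if_neg, not_false_iff]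
        rw [ih i h e he]
        constructor
        · intro hall m him hm
          rcases Nat.lt_or_ge m L.length with hm' | hm'
          · rw [List.getD_append _ _ _ _ hm']
            exact hall m him hm'
          · have hm2 : m = L.length := by simp at hm; omega
            subst hm2
            rw [List.getD_append_right _ _ _ _ (le_refl _)]
            simpa using hs
        · intro hall m him hm'
          have hx := hall m him (by simp; omega)
          rwa [List.getD_append _ _ _ _ hm'] at hx
    · have hi' : i = L.length := by simp at hi; omega
      subst hi'
      rw [List.getD_append_right _ _ _ _ (le_refl _)] at he
      simp only [Nat.sub_self] at he
      have hs : e ∈ s := by simpa using he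
      simp only [hs, if_pos]
      constructor
      · intro _ m him hm
        exfalso; simp at hm; omega
      · intro _; trivial

-- the per-index equivalence: "some later set meets this one" = "some element occurs later"
lemma pv_cond_eq (L : List (List Int)) (n : Int) (h0 : 0 ≤ n) (hl : n < (L.length : Int)) :
    (((PySem.List.pyRange 0 (L.length : Int) 1).filter (fun m => !(n ≥ m))).map
        (fun m => PySem.Set.inter (PySem.List.pyGetD L n []) (PySem.List.pyGetD L m []))).any
        (fun s => !s.isEmpty)
    = !((PySem.List.pyGetD L n []).all (fun e => (pvLast L).getD e (-1) == n)) := by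
  lift n to Nat using h0 with i
  have hi : i < L.length := by exact_mod_cast hl
  rw [Bool.eq_iff_iff]
  simp only [List.any_map, List.any_filter, List.any_eq_true, Bool.and_eq_true,
    Bool.not_eq_eq_eq_not, Bool.not_true, decide_eq_false_iff_not, not_le,
    List.all_eq_false, PySem.List.mem_pyRange_one, PySem.List.pyGetD_natCast]
  constructor
  · rintro ⟨m, ⟨hm0, hmlen⟩, him, hne⟩
    lift m to Nat using hm0 with k
    simp only [Function.comp, PySem.List.pyGetD_natCast, Bool.not_eq_eq_eq_not, Bool.not_true,
      List.isEmpty_eq_false_iff] at hne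
    obtain ⟨e, hein⟩ := List.exists_mem_of_ne_nil _ hne
    rw [PySem.Set.mem_inter] at hein
    refine ⟨e, hein.1, ?_⟩
    simp only [beq_iff_eq]
    intro hEq
    have hk : i < k := by exact_mod_cast him
    have hk2 : k < L.length := by exact_mod_cast hmlen
    exact (pvLast_getD_spec L i hi e hein.1).mp hEq k hk hk2 hein.2
  · rintro ⟨e, he, hne⟩
    simp only [beq_iff_eq] at hne
    rw [pvLast_getD_spec L i hi e he] at hne
    simp only [not_forall, not_not] at hne
    obtain ⟨m, him, hmlen, hem⟩ := hne
    refine ⟨(m : Int), ⟨Int.natCast_nonneg m, by exact_mod_cast hmlen⟩, by exact_mod_cast him, ?_⟩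
    simp only [Function.comp, PySem.List.pyGetD_natCast, Bool.not_eq_eq_eq_not, Bool.not_true,
      List.isEmpty_eq_false_iff]
    intro hemp
    have hmem : e ∈ PySem.Set.inter (L.getD i []) (L.getD m []) :=
      (PySem.Set.mem_inter _ _ _).mpr ⟨he, hem⟩
    rw [hemp] at hmem
    exact absurd hmem List.not_mem_nil

-- main count equality over the common preprocessed list
lemma pv_main (L : List (List Int)) :
    (PySem.List.pyRange 0 (L.length : Int) 1).foldl (fun (cnt : Int) n =>
      if (((PySem.List.pyRange 0 (L.length : Int) 1).filter (fun m => !(n ≥ m))).map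
            (fun m => PySem.Set.inter (PySem.List.pyGetD L n []) (PySem.List.pyGetD L m []))).any
          (fun s => !s.isEmpty)
      then cnt else cnt + 1) (0 : Int)
    = (PySem.List.enumerate L 0).foldl (fun (cnt : Int) p =>
        if p.2.all (fun e => (pvLast L).getD e (-1) == p.1) then cnt + 1 else cnt) (0 : Int) := by
  rw [show PySem.List.enumerate L 0 = PySem.List.enumerate L from rfl,
    PySem.List.enumerate_eq_map_pyRange L [], List.foldl_map]
  simp only [PySem.List.len_eq]
  apply PySem.List.foldl_congr_mem
  intro acc x hx
  rw [PySem.List.mem_pyRange_one] at hx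
  rw [pv_cond_eq L x hx.1 hx.2]
  cases h : (PySem.List.pyGetD L x []).all (fun e => (pvLast L).getD e (-1) == x) <;> simp

-- ===== VERDICT (by name: the statement is the Claim_ definition above) =====
theorem subnetworks_spec : Claim_equal_subnetworks := by
  intro net crushes _
  unfold Spec_subnetworks subnetworks subnetworks_alt
  simp only []
  exact pv_main _
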